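-- pv_equiv track=rewrite | github.com/donceykong/Lidar2OSM | composite_bki/scripts/learn_confusion_matrix.py | build_col_names
-- ===== SOURCE A (Python) =====
-- from collections import defaultdict
--
-- def build_col_names(osm_class_map: dict, k_prior: int) -> list[str]:
--     grouped = defaultdict(list)
--     for name, idx in osm_class_map.items():
--         grouped[idx].append(name)
--     col_names = []
--     for idx in range(k_prior):
--         names = grouped.get(idx, [f"prior_{idx}"])
--         col_names.append("/".join(sorted(names)))
--     return col_names
-- ===== SOURCE B (Python) =====
-- def build_col_names(osm_class_map: dict, k_prior: int) -> list[str]: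
--     col_names = []
--     for idx in range(k_prior):
--         names = [name for name, i in osm_class_map.items() if i == idx]
--         if not names:
--             names = [f"prior_{idx}"]
--         col_names.append("/".join(sorted(names)))
--     return col_names
-- ===== Notes on version B (the rewrite author's own statement) =====
-- stated objective: alternative
-- what changed: B drops the defaultdict inverted-index pass entirely and instead, for each idx in range(k_prior), scans the map once collecting the names with that index, substituting [f"prior_{idx}"] when none match.
import Mathlib
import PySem

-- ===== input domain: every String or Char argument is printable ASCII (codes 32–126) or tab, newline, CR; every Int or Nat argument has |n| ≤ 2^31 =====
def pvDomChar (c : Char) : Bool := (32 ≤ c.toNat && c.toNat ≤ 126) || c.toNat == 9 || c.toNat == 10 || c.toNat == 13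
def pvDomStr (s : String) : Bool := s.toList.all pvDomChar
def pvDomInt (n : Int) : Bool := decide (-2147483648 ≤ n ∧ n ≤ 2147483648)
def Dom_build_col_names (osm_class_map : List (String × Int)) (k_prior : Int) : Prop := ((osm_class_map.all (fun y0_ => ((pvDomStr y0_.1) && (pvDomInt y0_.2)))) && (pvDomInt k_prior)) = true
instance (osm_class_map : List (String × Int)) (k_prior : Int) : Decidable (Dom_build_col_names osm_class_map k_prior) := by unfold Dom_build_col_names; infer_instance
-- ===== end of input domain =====

-- B replaces A's one-pass defaultdict grouping by a per-index scan of the map (alternative decomposition, not faster).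

-- ===== PORT A =====
def build_col_names (osm_class_map : List (String × Int)) (k_prior : Int) : List String :=
  let grouped : PySem.Dict Int (List String) :=
    osm_class_map.foldl (fun d p => d.modify p.2 [] (fun v => v ++ [p.1])) PySem.Dict.empty
  (PySem.List.pyRange 0 k_prior 1).foldl
    (fun col_names idx =>
      let names := grouped.getD idx ["prior_" ++ PySem.Int.toStr idx]
      col_names ++ [PySem.Str.join "/" (PySem.List.sorted names (fun x => x) false)]) []

-- ===== PORT B =====
def build_col_names_alt (osm_class_map : List (String × Int)) (k_prior : Int) : List String :=
  (PySem.List.pyRange 0 k_prior 1).foldl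
    (fun col_names idx =>
      let names := (osm_class_map.filter (fun p => p.2 == idx)).map (fun p => p.1)
      let names := if names = [] then ["prior_" ++ PySem.Int.toStr idx] else names
      col_names ++ [PySem.Str.join "/" (PySem.List.sorted names (fun x => x) false)]) []

-- ===== PRECONDITION & SPEC =====
def Spec_build_col_names (osm_class_map : List (String × Int)) (k_prior : Int) (out : List String) : Prop := out = build_col_names_alt osm_class_map k_prior
instance (osm_class_map : List (String × Int)) (k_prior : Int) (out : List String) : Decidable (Spec_build_col_names osm_class_map k_prior out) := by unfold Spec_build_col_names; infer_instance

-- ===== CLAIM (what is proved, stated in full; the proofs are below) =====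
def Claim_equal_build_col_names : Prop := ∀ (osm_class_map : List (String × Int)) (k_prior : Int), Dom_build_col_names osm_class_map k_prior → Spec_build_col_names osm_class_map k_prior (build_col_names osm_class_map k_prior)

-- ===== LEMMAS AND PROOFS =====

theorem pv_getD_eq_get?_getD (d : PySem.Dict Int (List String)) (k : Int) (dflt : List String) :
    d.getD k dflt = (d.get? k).getD dflt := by
  simp [PySem.Dict.getD]

theorem pv_get?_modify (d : PySem.Dict Int (List String)) (k k' : Int) (d0 : List String)
    (f : List String → List String) :
    (d.modify k d0 f).get? k' = if k' = k then some (f (d.getD k d0)) else d.get? k' := by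
  simp [PySem.Dict.modify, PySem.Dict.get?_insert]

-- the grouping fold, characterised pointwise
theorem pv_group_get? (m : List (String × Int)) (d : PySem.Dict Int (List String)) (idx : Int) :
    (m.foldl (fun d p => d.modify p.2 [] (fun v => v ++ [p.1])) d).get? idx =
      if m.filter (fun p => p.2 == idx) = [] then d.get? idx
      else some (d.getD idx [] ++ (m.filter (fun p => p.2 == idx)).map (fun p => p.1)) := by
  induction m generalizing d with
  | nil => simp
  | cons p rest ih =>
    simp only [List.foldl_cons, List.filter_cons]
    by_cases h : p.2 = idx
    · simp only [h, beq_self_eq_true, if_pos, ih]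
      by_cases hr : rest.filter (fun q => q.2 == idx) = []
      · simp [hr, pv_get?_modify]
      · simp [hr, pv_getD_eq_get?_getD, PySem.Dict.getD_modify_self]
    · have hb : (p.2 == idx) = false := by simp [h]
      simp only [hb, Bool.false_eq_true, if_false, ih]
      have h1 : (d.modify p.2 [] (fun v => v ++ [p.1])).get? idx = d.get? idx := by
        rw [pv_get?_modify, if_neg (show idx ≠ p.2 from fun hc => h hc.symm)]
      have h2 : (d.modify p.2 [] (fun v => v ++ [p.1])).getD idx [] = d.getD idx [] := by
        rw [pv_getD_eq_get?_getD, h1, pv_getD_eq_get?_getD]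
      rw [h1, h2]

-- A's lookup equals B's per-index scan (with the empty-match default)
theorem pv_names_eq (m : List (String × Int)) (idx : Int) (dflt : List String) :
    (m.foldl (fun d p => d.modify p.2 [] (fun v => v ++ [p.1]))
        (PySem.Dict.empty : PySem.Dict Int (List String))).getD idx dflt =
      (if (m.filter (fun p => p.2 == idx)).map (fun p => p.1) = [] then dflt
       else (m.filter (fun p => p.2 == idx)).map (fun p => p.1)) := by
  rw [pv_getD_eq_get?_getD, pv_group_get?]
  by_cases h : m.filter (fun p => p.2 == idx) = []
  · simp [h, PySem.Dict.empty, PySem.Dict.get?]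
  · have hm : (m.filter (fun p => p.2 == idx)).map (fun p => p.1) ≠ [] := by
      simpa using h
    simp [h, hm, PySem.Dict.empty, PySem.Dict.getD, PySem.Dict.get?]

-- ===== VERDICT (by name: the statement is the Claim_ definition above) =====
theorem build_col_names_spec : Claim_equal_build_col_names := by
  intro m k _
  simp only [Spec_build_col_names, build_col_names, build_col_names_alt]
  congr 1
  funext acc idx
  rw [pv_names_eq]
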